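-- pv_equiv track=rewrite | github.com/JSBCCA/pythoncode | early_projects/dict_dups.py | count_dict_dups
-- ===== SOURCE A (Python) =====
-- def count_dict_dups(dictionary):
--     """dict -> int
--     Returns a set of the integers that have duplicates.
--
--     >>>count_dict_dups({'red': 1, 'blue': 2, 'green': 1, 'orange': 1})
--     1
--
--     >>>count_dict_dups({'a': 2, 'b': 2, 'c': 4, 'd': 4})
--     2
--
--     """
--     seen_values = set()
--     duplicates = set()
--     for i in dictionary:
--         if dictionary[i] in seen_values:
--             duplicates.add(dictionary[i])
--         else:
--             seen_values.add(dictionary[i])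
--     return (len(duplicates))
-- ===== SOURCE B (Python) =====
-- def count_dict_dups(dictionary):
--     """Tally value frequencies first, then count how many tallies exceed 1."""
--     counts = {}
--     for v in dictionary.values():
--         counts[v] = counts.get(v, 0) + 1
--     return sum(1 for c in counts.values() if c > 1)
-- ===== Notes on version B (the rewrite author's own statement) =====
-- stated objective: idiomatic
-- what changed: B replaces A's single-pass branching over two sets (seen/duplicates) by a two-pass tally-then-filter decomposition: build a value->frequency table first, then count the frequencies greater than 1.
import Mathlib
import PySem

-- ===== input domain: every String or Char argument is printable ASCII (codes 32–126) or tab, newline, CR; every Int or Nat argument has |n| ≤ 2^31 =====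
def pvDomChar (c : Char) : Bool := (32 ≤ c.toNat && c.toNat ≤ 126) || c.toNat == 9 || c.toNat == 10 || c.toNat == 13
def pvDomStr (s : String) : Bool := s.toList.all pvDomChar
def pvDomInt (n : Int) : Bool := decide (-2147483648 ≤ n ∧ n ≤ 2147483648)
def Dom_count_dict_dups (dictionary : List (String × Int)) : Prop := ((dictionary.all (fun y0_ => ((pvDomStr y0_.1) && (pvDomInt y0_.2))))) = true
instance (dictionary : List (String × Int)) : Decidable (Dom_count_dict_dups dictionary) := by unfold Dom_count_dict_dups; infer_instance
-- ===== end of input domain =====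

-- B replaces A's single-pass two-set branching by a tally-then-filter decomposition
-- (build a value-frequency dict, then count the tallies > 1); alternative, same cost.
-- A dict's keys are unique, so 'for i in dictionary: dictionary[i]' visits exactly the values in order.

-- ===== PORT A =====
-- one loop step: if the value was seen, add it to duplicates, else to seen_values
def cddStep (sd : PySem.Set Int × PySem.Set Int) (v : Int) : PySem.Set Int × PySem.Set Int :=
  if PySem.Set.contains sd.1 v then (sd.1, PySem.Set.add sd.2 v) else (PySem.Set.add sd.1 v, sd.2)

def count_dict_dups (dictionary : List (String × Int)) : Int :=
  let r := dictionary.foldl (fun sd kv => cddStep sd kv.2) (PySem.Set.empty, PySem.Set.empty)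
  PySem.Set.len r.2

-- ===== PORT B =====
def count_dict_dups_alt (dictionary : List (String × Int)) : Int :=
  -- counts[v] = counts.get(v, 0) + 1 over dictionary.values()
  let counts : PySem.Dict Int Int :=
    (dictionary.map (fun kv => kv.2)).foldl (fun d v => d.modify v 0 (· + 1)) PySem.Dict.empty
  -- sum(1 for c in counts.values() if c > 1)
  ((counts.values.filter (fun c => 1 < c)).length : Int)

-- ===== PRECONDITION & SPEC =====
def Spec_count_dict_dups (dictionary : List (String × Int)) (out : Int) : Prop := out = count_dict_dups_alt dictionary
instance (dictionary : List (String × Int)) (out : Int) : Decidable (Spec_count_dict_dups dictionary out) := by unfold Spec_count_dict_dups; infer_instance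

-- ===== CLAIM (what is proved, stated in full; the proofs are below) =====
def Claim_equal_count_dict_dups : Prop := ∀ (dictionary : List (String × Int)), Dom_count_dict_dups dictionary → Spec_count_dict_dups dictionary (count_dict_dups dictionary)

-- ===== LEMMAS AND PROOFS =====

-- A's loop invariant, from the right: seen = set(prefix), dups is duplicate-free and
-- holds exactly the values occurring at least twice in the prefix.
theorem cddLoop_char (vs : List Int) :
    (vs.foldl cddStep (PySem.Set.empty, PySem.Set.empty)).1 = PySem.Set.ofList vs ∧
    (vs.foldl cddStep (PySem.Set.empty, PySem.Set.empty)).2.Nodup ∧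
    (∀ x : Int, x ∈ (vs.foldl cddStep (PySem.Set.empty, PySem.Set.empty)).2 ↔ 2 ≤ vs.count x) := by
  induction vs using List.reverseRecOn with
  | nil => refine ⟨rfl, List.nodup_nil, fun x => ?_⟩; simp [PySem.Set.empty]
  | append_singleton ys v ih =>
    obtain ⟨h1, h2, h3⟩ := ih
    rw [List.foldl_append]
    simp only [List.foldl_cons, List.foldl_nil]
    set r := List.foldl cddStep (PySem.Set.empty, PySem.Set.empty) ys with hr
    by_cases hv : v ∈ PySem.Set.ofList ys
    · have hs : cddStep r v = (r.1, PySem.Set.add r.2 v) := by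
        simp only [cddStep]
        rw [if_pos (by rw [h1]; exact (PySem.Set.contains_iff _ _).mpr hv)]
      rw [hs]
      refine ⟨by rw [h1, PySem.Set.ofList_append_singleton, PySem.Set.add_of_mem hv],
        PySem.Set.nodup_add _ _ h2, fun x => ?_⟩
      rw [PySem.Set.mem_add, h3, List.count_append]
      rcases eq_or_ne x v with rfl | hne
      · have hx : 1 ≤ ys.count x := List.one_le_count_iff.mpr ((PySem.Set.mem_ofList _ _).mp hv)
        simp
        exact List.one_le_count_iff.mp hx
      · have hvx : v ≠ x := Ne.symm hne
        simp [hvx]; omega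
    · have hs : cddStep r v = (PySem.Set.add r.1 v, r.2) := by
        simp only [cddStep]
        rw [if_neg (by rw [h1]; simp [hv])]
      rw [hs]
      refine ⟨by rw [h1, ← PySem.Set.ofList_append_singleton], h2, fun x => ?_⟩
      rw [h3, List.count_append]
      rcases eq_or_ne x v with rfl | hne
      · have hx : ys.count x = 0 := by
          rw [List.count_eq_zero]; exact fun hm => hv ((PySem.Set.mem_ofList _ _).mpr hm)
        simp [hx]
      · have hvx : v ≠ x := Ne.symm hne
        simp [hvx]

-- B's result counts the distinct values with multiplicity ≥ 2
theorem alt_char (dictionary : List (String × Int)) :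
    count_dict_dups_alt dictionary =
      (((PySem.Set.ofList (dictionary.map (fun kv => kv.2))).filter
        (fun k => decide (2 ≤ (dictionary.map (fun kv => kv.2)).count k))).length : Int) := by
  unfold count_dict_dups_alt
  rw [← PySem.Dict.counter_eq_foldl]
  simp only [PySem.Dict.values, PySem.Dict.items_counter, List.map_map, List.filter_map,
    List.length_map]
  congr 1
  refine congrArg List.length (List.filter_congr fun x _ => ?_)
  simp only [Function.comp, decide_eq_decide]
  omega

-- ===== VERDICT (by name: the statement is the Claim_ definition above) =====
theorem count_dict_dups_spec : Claim_equal_count_dict_dups := by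
  intro dictionary _
  unfold Spec_count_dict_dups
  set vs := dictionary.map (fun kv => kv.2) with hvs
  obtain ⟨h1, h2, h3⟩ := cddLoop_char vs
  unfold count_dict_dups
  rw [alt_char, PySem.Set.len_eq, ← List.foldl_map (f := fun kv : String × Int => kv.2), ← hvs]
  congr 1
  refine ((List.perm_ext_iff_of_nodup h2 ?_).mpr fun x => ?_).length_eq
  · exact (PySem.Set.nodup_ofList vs).filter _
  · rw [h3, List.mem_filter, PySem.Set.mem_ofList]
    constructor
    · intro h; exact ⟨List.one_le_count_iff.mp (by omega), by simpa using h⟩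
    · intro ⟨_, h⟩; simpa using h
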